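-- pv_equiv track=rewrite | github.com/yagizdas/phi-delta | parsers/parse_critic_plan.py | parse_critic_plan
-- ===== SOURCE A (Python) =====
-- def parse_critic_plan(text: str):
--
--     steps = []
--     step = []
--     first = False
--     started = False
--     for line in text.splitlines():
--         line = line.strip()
--         if line.lower().startswith("step"):
--             started = True
--             if not first:
--                 first = True
--                 step = []
--                 step.append(line)
--                 continue
--             steps.append(step)
--             step = []
--
--         if started:
--             step.append(line)
--
--     if step:
--         steps.append(step)
--
--     folded_steps = []
--     for step in steps:
--         step_string = ""
--         for line in step:
--             step_string += line
--         folded_steps.append(step_string)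
--
--     return folded_steps
-- ===== SOURCE B (Python) =====
-- def _is_step(line):
--     return line.lower().startswith("step")
--
-- def _drop_prefix(lines):
--     while lines and not _is_step(lines[0]):
--         lines = lines[1:]
--     return lines
--
-- def _split_group(lines):
--     body = []
--     while lines and not _is_step(lines[0]):
--         body.append(lines[0])
--         lines = lines[1:]
--     return body, lines
--
-- def parse_critic_plan(text):
--     rest = _drop_prefix([l.strip() for l in text.splitlines()])
--     out = []
--     while rest:
--         head = rest[0]
--         body, rest = _split_group(rest[1:])
--         out.append(head + "".join(body))
--     return out
-- ===== Notes on version B (the rewrite author's own statement) =====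
-- stated objective: simpler
-- what changed: Replaces A's single stateful pass with first/started flags plus a second fold-join loop over accumulated line groups by a drop-prefix then repeated split-at-next-step-line decomposition that builds each joined step string directly.
import Mathlib
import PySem

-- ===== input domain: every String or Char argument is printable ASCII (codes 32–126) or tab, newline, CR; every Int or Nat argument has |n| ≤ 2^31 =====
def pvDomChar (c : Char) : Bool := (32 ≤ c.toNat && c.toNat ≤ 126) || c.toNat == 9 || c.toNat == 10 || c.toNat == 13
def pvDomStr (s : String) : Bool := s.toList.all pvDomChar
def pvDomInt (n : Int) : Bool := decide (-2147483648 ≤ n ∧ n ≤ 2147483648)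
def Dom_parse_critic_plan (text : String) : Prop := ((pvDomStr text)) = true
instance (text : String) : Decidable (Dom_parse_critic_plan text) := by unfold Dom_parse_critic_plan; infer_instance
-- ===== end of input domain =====

-- B replaces A's stateful flag-driven accumulation pass with drop-prefix + split-at-next-step grouping (objective: simpler decomposition, same cost).

-- shared predicate: line.lower().startswith("step")
def pcpIsStep (line : String) : Bool := PySem.Str.startswith (PySem.Str.lower line) "step"

-- ===== PORT A =====
-- the for-loop of A: state (steps, step, first, started)
def pcpLoopA : List String → List (List String) → List String → Bool → Bool → List (List String) × List String
  | [], steps, step, _, _ => (steps, step)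
  | line :: rest, steps, step, first, started =>
    let l := PySem.Str.strip line
    if pcpIsStep l then
      if first = false then pcpLoopA rest steps [l] true true
      else pcpLoopA rest (steps ++ [step]) [l] true true
    else
      if started then pcpLoopA rest steps (step ++ [l]) first started
      else pcpLoopA rest steps step first started

-- A's folding loop: step_string built by repeated +=
def pcpFold (step : List String) : String := step.foldl (fun acc line => acc ++ line) ""

def parse_critic_plan (text : String) : List String :=
  let r := pcpLoopA (PySem.Str.splitlines text) [] [] false false
  let steps := if r.2 ≠ [] then r.1 ++ [r.2] else r.1
  steps.map pcpFold

-- ===== PORT B =====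
-- _drop_prefix of Source B
def pcpDropPrefix : List String → List String
  | [] => []
  | l :: ls => if !pcpIsStep l then pcpDropPrefix ls else l :: ls

-- _split_group of Source B
def pcpSplitGroup : List String → List String × List String
  | [] => ([], [])
  | l :: ls =>
    if !pcpIsStep l then
      let r := pcpSplitGroup ls
      (l :: r.1, r.2)
    else ([], l :: ls)

-- termination fact for the main while loop of Source B
theorem pcpSplitGroup_len : ∀ ls : List String, (pcpSplitGroup ls).2.length ≤ ls.length := by
  intro ls
  induction ls with
  | nil => simp [pcpSplitGroup]
  | cons l ls ih =>
    by_cases h : pcpIsStep l = true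
    · simp [pcpSplitGroup, h]
    · simp [pcpSplitGroup, h]; omega

-- main while loop of Source B
def pcpLoopB : List String → List String
  | [] => []
  | head :: rest0 =>
    let r := pcpSplitGroup rest0
    (head ++ PySem.Str.join "" r.1) :: pcpLoopB r.2
termination_by ls => ls.length
decreasing_by
  exact Nat.lt_succ_of_le (pcpSplitGroup_len rest0)

def parse_critic_plan_alt (text : String) : List String :=
  pcpLoopB (pcpDropPrefix ((PySem.Str.splitlines text).map PySem.Str.strip))

-- ===== PRECONDITION & SPEC =====
def Spec_parse_critic_plan (text : String) (out : List String) : Prop := out = parse_critic_plan_alt text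
instance (text : String) (out : List String) : Decidable (Spec_parse_critic_plan text out) := by unfold Spec_parse_critic_plan; infer_instance

-- ===== CLAIM (what is proved, stated in full; the proofs are below) =====
def Claim_equal_parse_critic_plan : Prop := ∀ (text : String), Dom_parse_critic_plan text → Spec_parse_critic_plan text (parse_critic_plan text)

-- ===== LEMMAS AND PROOFS =====

theorem pcp_join_empty_cons (b : String) (bs : List String) :
    PySem.Str.join "" (b :: bs) = b ++ PySem.Str.join "" bs := by
  cases bs with
  | nil => simp [PySem.Str.join, PySem.Chars.join, List.intercalate]
  | cons q rest => simp [PySem.Str.join, PySem.Chars.join_cons_cons]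

theorem pcp_foldl_join (bs : List String) (h : String) :
    bs.foldl (fun acc line => acc ++ line) h = h ++ PySem.Str.join "" bs := by
  induction bs generalizing h with
  | nil => simp [PySem.Str.join, PySem.Chars.join, List.intercalate]
  | cons b bs ih =>
    simp only [List.foldl_cons, ih, pcp_join_empty_cons]
    simp [String.append_assoc]

theorem pcp_fold_cons (b : String) (bs : List String) :
    pcpFold (b :: bs) = b ++ PySem.Str.join "" bs := by
  simp [pcpFold, pcp_foldl_join]

-- spec-level grouping function A's started phase computes (strips as it goes, like A)
def pcpGather (cur : List String) : List String → List String
  | [] => [pcpFold cur]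
  | l :: ls =>
    let l' := PySem.Str.strip l
    if pcpIsStep l' then pcpFold cur :: pcpGather [l'] ls
    else pcpGather (cur ++ [l']) ls

-- A's post-loop finalization: append the pending step (if any) and fold each group
def pcpFinish (r : List (List String) × List String) : List String :=
  (if r.2 ≠ [] then r.1 ++ [r.2] else r.1).map pcpFold

theorem pcp_parse_eq_finish (text : String) :
    parse_critic_plan text = pcpFinish (pcpLoopA (PySem.Str.splitlines text) [] [] false false) := rfl

-- A's loop in the started phase computes pcpGather
theorem pcp_loopA_started (ls : List String) :
    ∀ (steps : List (List String)) (cur : List String), cur ≠ [] →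
    pcpFinish (pcpLoopA ls steps cur true true) = steps.map pcpFold ++ pcpGather cur ls := by
  induction ls with
  | nil => intro steps cur hcur; simp [pcpLoopA, pcpGather, pcpFinish, hcur]
  | cons l ls ih =>
    intro steps cur hcur
    by_cases h : pcpIsStep (PySem.Str.strip l) = true
    · simp only [pcpLoopA, pcpGather, h, if_true, Bool.true_eq_false, if_false]
      rw [ih (steps ++ [cur]) [PySem.Str.strip l] (by simp)]
      simp
    · simp only [pcpLoopA, pcpGather, h, if_false, Bool.false_eq_true, if_true]
      rw [ih steps (cur ++ [PySem.Str.strip l]) (by simp)]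

-- pcpGather is B's group: join the non-step body, then recurse on the rest
theorem pcp_gather_eq_loopB (ls : List String) :
    ∀ (cur : List String),
    pcpGather cur ls
    = pcpFold (cur ++ (pcpSplitGroup (ls.map PySem.Str.strip)).1)
      :: pcpLoopB (pcpSplitGroup (ls.map PySem.Str.strip)).2 := by
  induction ls with
  | nil => intro cur; simp [pcpGather, pcpSplitGroup, pcpLoopB]
  | cons l ls ih =>
    intro cur
    by_cases h : pcpIsStep (PySem.Str.strip l) = true
    · simp only [pcpGather, h, if_true, List.map_cons, pcpSplitGroup, Bool.not_true,
        Bool.false_eq_true, if_false]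
      rw [ih [PySem.Str.strip l]]
      simp [pcpLoopB, pcp_fold_cons]
    · simp only [pcpGather, h, if_false, List.map_cons, pcpSplitGroup, Bool.false_eq_true,
        Bool.not_false, if_true]
      rw [ih (cur ++ [PySem.Str.strip l])]
      simp

-- the pre-start phase: A skips lines, B drops them
theorem pcp_prestart (ls : List String) :
    pcpFinish (pcpLoopA ls [] [] false false)
    = pcpLoopB (pcpDropPrefix (ls.map PySem.Str.strip)) := by
  induction ls with
  | nil => simp [pcpLoopA, pcpFinish, pcpDropPrefix, pcpLoopB]
  | cons l ls ih =>
    by_cases h : pcpIsStep (PySem.Str.strip l) = true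
    · simp only [pcpLoopA, h, if_true, List.map_cons, pcpDropPrefix, Bool.not_true,
        Bool.false_eq_true, if_false]
      rw [pcp_loopA_started ls [] [PySem.Str.strip l] (by simp)]
      rw [pcp_gather_eq_loopB ls [PySem.Str.strip l]]
      simp [pcpLoopB, pcp_fold_cons]
    · simp only [pcpLoopA, h, if_false, List.map_cons, pcpDropPrefix, Bool.false_eq_true,
        Bool.not_false, if_true]
      exact ih

-- ===== VERDICT (by name: the statement is the Claim_ definition above) =====
theorem parse_critic_plan_spec : Claim_equal_parse_critic_plan := by
  intro text _
  unfold Spec_parse_critic_plan parse_critic_plan_alt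
  rw [pcp_parse_eq_finish, pcp_prestart]
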